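-- pv_equiv track=rewrite | github.com/shibam120302/GFG_POTD | Count Special Numbers.py | countSpecialNumbers
-- ===== SOURCE A (Python) =====
-- def countSpecialNumbers(N, arr):
--
--     frequency = dict()
--     distinctElements = set()
--     maxVal = 0
--     for i in arr:
--         distinctElements.add(i)
--         maxVal=max(i,maxVal)
--         if(i in frequency):
--             frequency[i]+=1
--         else:
--             frequency[i]=1
--
--     specialNumbers = set()
--     for i in distinctElements:
--         for j in range(2*i,maxVal+1, i):
--             if(j in distinctElements):
--                 specialNumbers.add(j)
--
--     ans = 0
--
--     for ele in frequency.keys():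
--         if(frequency[ele]>1):
--             ans+=frequency[ele]
--
--         elif(ele in specialNumbers):
--             ans+=1
--
--     return ans
-- ===== SOURCE B (Python) =====
-- def countSpecialNumbers(N, arr):
--     freq = {}
--     for x in arr:
--         freq[x] = freq.get(x, 0) + 1
--
--     def is_special(x):
--         # trial division up to sqrt(x): x is special iff it has a proper
--         # positive divisor that occurs in arr
--         if x <= 0:
--             return False
--         d = 1
--         while d * d <= x:
--             if x % d == 0:
--                 if (d < x and d in freq) or (x // d < x and x // d in freq):
--                     return True
--             d += 1
--         return False
--
--     ans = 0
--     for x, c in freq.items():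
--         if c > 1:
--             ans += c
--         elif is_special(x):
--             ans += 1
--     return ans
-- ===== Notes on version B (the rewrite author's own statement) =====
-- stated objective: alternative
-- what changed: Replaces A's sieve that marks every multiple of every distinct element up to max(arr) with a per-element trial division up to sqrt(x) that looks for a proper positive divisor occurring in the array, and folds the count over dict items instead of building a separate specials set.
import Mathlib
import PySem

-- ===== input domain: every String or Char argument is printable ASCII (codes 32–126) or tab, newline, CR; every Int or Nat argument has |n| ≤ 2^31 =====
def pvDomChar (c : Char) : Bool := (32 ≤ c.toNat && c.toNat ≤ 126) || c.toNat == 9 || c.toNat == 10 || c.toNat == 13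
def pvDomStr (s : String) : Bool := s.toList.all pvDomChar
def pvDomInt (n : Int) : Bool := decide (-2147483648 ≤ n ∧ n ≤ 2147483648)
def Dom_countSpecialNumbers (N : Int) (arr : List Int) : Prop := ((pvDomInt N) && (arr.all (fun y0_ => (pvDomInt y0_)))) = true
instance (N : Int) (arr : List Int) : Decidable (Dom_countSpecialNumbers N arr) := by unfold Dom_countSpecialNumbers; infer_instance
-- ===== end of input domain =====

-- B replaces A's sieve over multiples (up to max(arr)) by per-element trial
-- division up to sqrt(x) looking for a proper positive divisor present in arr.

-- ===== PORT A =====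
def countSpecialNumbers (N : Int) (arr : List Int) : Int :=
  let st := arr.foldl
    (fun (st : PySem.Dict Int Int × PySem.Set Int × Int) i =>
      (if st.1.contains i then st.1.modify i 0 (· + 1) else st.1.insert i 1,
       st.2.1.add i, max i st.2.2))
    (PySem.Dict.empty, PySem.Set.empty, 0)
  let frequency := st.1
  let distinctElements := st.2.1
  let maxVal := st.2.2
  let specialNumbers := distinctElements.foldl
    (fun sp i =>
      (PySem.List.pyRange (2 * i) (maxVal + 1) i).foldl
        (fun sp j => if distinctElements.contains j then sp.add j else sp) sp)
    PySem.Set.empty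
  frequency.keys.foldl
    (fun ans ele =>
      if frequency.getD ele 0 > 1 then ans + frequency.getD ele 0
      else if specialNumbers.contains ele then ans + 1 else ans) 0

-- ===== PORT B =====
-- the 'while d * d <= x' loop of Source B's is_special
def pvTrialDiv (freq : PySem.Dict Int Int) (x d : Int) : Bool :=
  if _h : d * d ≤ x then
    if PySem.Int.mod x d = 0 ∧
        ((d < x ∧ freq.contains d) ∨
         (PySem.Int.floordiv x d < x ∧ freq.contains (PySem.Int.floordiv x d))) then
      true
    else pvTrialDiv freq x (d + 1)
  else false
termination_by (x + 1 - d).toNat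
decreasing_by
  have hdx : d ≤ x := by
    by_cases h0 : d ≤ 0
    · have := mul_self_nonneg d; omega
    · nlinarith
  omega

def pvIsSpecial (freq : PySem.Dict Int Int) (x : Int) : Bool :=
  if x ≤ 0 then false else pvTrialDiv freq x 1

def countSpecialNumbers_alt (N : Int) (arr : List Int) : Int :=
  let freq := arr.foldl (fun d x => d.insert x (d.getD x 0 + 1)) PySem.Dict.empty
  freq.items.foldl
    (fun ans kv =>
      if kv.2 > 1 then ans + kv.2
      else if pvIsSpecial freq kv.1 then ans + 1 else ans) 0

-- ===== PRECONDITION & SPEC =====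
-- Pre_ excludes arrays containing 0, on which A raises ValueError (range() with step 0).
def Pre_countSpecialNumbers (N : Int) (arr : List Int) : Prop := (0 : Int) ∉ arr
instance (N : Int) (arr : List Int) : Decidable (Pre_countSpecialNumbers N arr) := by
  unfold Pre_countSpecialNumbers; infer_instance

def pvWitness_countSpecialNumbers : Int × List Int := (4, [2, 3, 6, 3])

def Spec_countSpecialNumbers (N : Int) (arr : List Int) (out : Int) : Prop :=
  out = countSpecialNumbers_alt N arr
instance (N : Int) (arr : List Int) (out : Int) : Decidable (Spec_countSpecialNumbers N arr out) := by
  unfold Spec_countSpecialNumbers; infer_instance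

-- ===== CLAIM (what is proved, stated in full; the proofs are below) =====
def Claim_equal_countSpecialNumbers : Prop := ∀ (N : Int) (arr : List Int), Dom_countSpecialNumbers N arr → Pre_countSpecialNumbers N arr → Spec_countSpecialNumbers N arr (countSpecialNumbers N arr)


-- ===== LEMMAS AND PROOFS =====

-- A's frequency-update branch is exactly Counter's step
lemma pvStepA_eq_counter (d : PySem.Dict Int Int) (x : Int) :
    (if d.contains x then d.modify x 0 (· + 1) else d.insert x 1) =
      d.modify x 0 (· + 1) := by
  split_ifs with h
  · rfl
  · have h0 : d.getD x 0 = 0 := by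
      simp only [PySem.Dict.getD, PySem.Dict.get?]
      rw [List.find?_eq_none.mpr]
      · rfl
      · intro p hp hpx
        exact h (by simp only [PySem.Dict.contains, List.any_eq_true]; exact ⟨p, hp, hpx⟩)
    simp [PySem.Dict.modify, h0]

-- splitting a fold over a triple state into three independent folds
lemma pvFoldl_prod3 {α β γ δ : Type} (f : α → δ → α) (g : β → δ → β) (h : γ → δ → γ)
    (l : List δ) (a : α) (b : β) (c : γ) :
    l.foldl (fun s x => (f s.1 x, g s.2.1 x, h s.2.2 x)) (a, b, c) =
      (l.foldl f a, l.foldl g b, l.foldl h c) := by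
  induction l generalizing a b c with
  | nil => rfl
  | cons y t ih => simpa using ih (f a y) (g b y) (h c y)

-- running maximum bound
lemma pvMax_bound (arr : List Int) :
    0 ≤ arr.foldl (fun m i => max i m) 0 ∧
      ∀ y ∈ arr, y ≤ arr.foldl (fun m i => max i m) 0 := by
  have he : arr.foldl (fun m i => max i m) 0 = arr.foldl max 0 :=
    PySem.List.foldl_congr_mem arr _ _ 0 (fun acc x _ => max_comm x acc)
  rw [he]
  exact ⟨(PySem.List.le_foldl_max arr 0).1, (PySem.List.le_foldl_max arr 0).2⟩

-- membership in the inner sieve fold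
lemma pvMem_inner (S : PySem.Set Int) (r : List Int) (sp : PySem.Set Int) (x : Int) :
    x ∈ r.foldl (fun sp j => if S.contains j then sp.add j else sp) sp ↔
      x ∈ sp ∨ (x ∈ r ∧ S.contains x = true) := by
  induction r generalizing sp with
  | nil => simp
  | cons j t ih =>
    simp only [List.foldl_cons, ih, List.mem_cons]
    by_cases hj : S.contains j = true
    · rw [if_pos hj, PySem.Set.mem_add]
      constructor
      · rintro ((h | rfl) | h)
        · exact Or.inl h
        · exact Or.inr ⟨Or.inl rfl, hj⟩
        · exact Or.inr ⟨Or.inr h.1, h.2⟩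
      · rintro (h | ⟨rfl | h, hx⟩)
        · exact Or.inl (Or.inl h)
        · exact Or.inl (Or.inr rfl)
        · exact Or.inr ⟨h, hx⟩
    · rw [if_neg hj]
      constructor
      · rintro (h | h)
        · exact Or.inl h
        · exact Or.inr ⟨Or.inr h.1, h.2⟩
      · rintro (h | ⟨rfl | h, hx⟩)
        · exact Or.inl h
        · exact absurd hx hj
        · exact Or.inr ⟨h, hx⟩

-- membership in the specials set built by A's nested sieve loops
lemma pvMem_specials (S : PySem.Set Int) (mx : Int) (l : List Int) (sp : PySem.Set Int) (x : Int) :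
    x ∈ l.foldl
        (fun sp i =>
          (PySem.List.pyRange (2 * i) (mx + 1) i).foldl
            (fun sp j => if S.contains j then sp.add j else sp) sp) sp ↔
      x ∈ sp ∨ ∃ i ∈ l, x ∈ PySem.List.pyRange (2 * i) (mx + 1) i ∧ S.contains x = true := by
  induction l generalizing sp with
  | nil => simp
  | cons i t ih =>
    simp only [List.foldl_cons, ih, pvMem_inner, List.mem_cons]
    constructor
    · rintro ((h | h) | ⟨i', hi', h⟩)
      · exact Or.inl h
      · exact Or.inr ⟨i, Or.inl rfl, h⟩
      · exact Or.inr ⟨i', Or.inr hi', h⟩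
    · rintro (h | ⟨i', (rfl | hi'), h⟩)
      · exact Or.inl (Or.inl h)
      · exact Or.inl (Or.inr h)
      · exact Or.inr ⟨i', hi', h⟩

lemma pvRange_empty_of_neg (a b s : Int) (hs : s < 0) (hab : a ≤ b) :
    PySem.List.pyRange a b s = [] := by
  unfold PySem.List.pyRange
  rw [if_neg (by omega)]
  simp only [if_neg (not_lt.mpr hs.le), if_neg (not_lt.mpr hab)]
  simp

-- floordiv/mod agree with ediv/dvd for nonnegative divisors
lemma pvFloordiv_eq (a b : Int) (hb : 0 ≤ b) : PySem.Int.floordiv a b = a / b := by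
  simp [PySem.Int.floordiv, Int.fdiv_eq_ediv, hb]

lemma pvMod_zero_iff (a b : Int) : PySem.Int.mod a b = 0 ↔ b ∣ a :=
  ⟨fun h => Int.dvd_of_fmod_eq_zero h, fun h => Int.fmod_eq_zero_of_dvd h⟩

-- characterisation of the trial-division loop
lemma pvTrialDiv_iff (freq : PySem.Dict Int Int) (x c : Int) (hc : 1 ≤ c) :
    pvTrialDiv freq x c = true ↔
      ∃ d, c ≤ d ∧ d * d ≤ x ∧ PySem.Int.mod x d = 0 ∧
        ((d < x ∧ freq.contains d = true) ∨
         (PySem.Int.floordiv x d < x ∧ freq.contains (PySem.Int.floordiv x d) = true)) := by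
  revert hc
  induction c using pvTrialDiv.induct (freq := freq) (x := x) with
  | case1 d hle hcond =>
    intro hc
    rw [pvTrialDiv]
    simp only [dif_pos hle, if_pos hcond]
    exact ⟨fun _ => ⟨d, le_refl d, hle, hcond⟩, fun _ => trivial⟩
  | case2 d hle hncond ih =>
    intro hc
    rw [pvTrialDiv]
    simp only [dif_pos hle, if_neg hncond]
    rw [ih (by omega)]
    constructor
    · rintro ⟨d', hdd, h⟩
      exact ⟨d', by omega, h⟩
    · rintro ⟨d', hdd, hsq, h⟩
      rcases eq_or_lt_of_le hdd with rfl | hlt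
      · exact absurd h hncond
      · exact ⟨d', by omega, hsq, h⟩
  | case3 d hle =>
    intro hc
    constructor
    · intro h
      rw [pvTrialDiv] at h
      simp [dif_neg hle] at h
    · rintro ⟨d', hdd, hsq, _⟩
      exact absurd (by nlinarith : d * d ≤ x) hle

-- the divisor-pairing bridge: trial division up to sqrt finds a proper positive divisor
lemma pvBridge (freq : PySem.Dict Int Int) (x : Int) (hx : 0 < x) :
    (pvTrialDiv freq x 1 = true) ↔
      ∃ e, 0 < e ∧ e < x ∧ e ∣ x ∧ freq.contains e = true := by
  rw [pvTrialDiv_iff freq x 1 le_rfl]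
  constructor
  · rintro ⟨d, h1d, hsq, hmod, hdisj⟩
    have hdvd : d ∣ x := (pvMod_zero_iff x d).mp hmod
    rcases hdisj with ⟨hdx, hcont⟩ | ⟨hqx, hcont⟩
    · exact ⟨d, by omega, hdx, hdvd, hcont⟩
    · rw [pvFloordiv_eq x d (by omega)] at hqx hcont
      have hxd : x / d * d = x := Int.ediv_mul_cancel hdvd
      have hq0 : 0 < x / d := by nlinarith
      exact ⟨x / d, hq0, hqx, ⟨d, hxd.symm⟩, hcont⟩
  · rintro ⟨e, he0, hex, hdvd, hcont⟩
    obtain ⟨m, hm⟩ := hdvd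
    have hm1 : 1 < m := by nlinarith
    by_cases hle : e * e ≤ x
    · exact ⟨e, by omega, hle, (pvMod_zero_iff x e).mpr ⟨m, hm⟩,
        Or.inl ⟨hex, hcont⟩⟩
    · have hme : m < e := by nlinarith
      have hmm : m * m ≤ x := by nlinarith
      have hmdvd : m ∣ x := ⟨e, by rw [hm]; ring⟩
      have hfd : PySem.Int.floordiv x m = e := by
        rw [pvFloordiv_eq x m (by omega), hm, Int.mul_ediv_cancel e (by omega)]
      exact ⟨m, by omega, hmm, (pvMod_zero_iff x m).mpr hmdvd,
        Or.inr ⟨by rw [hfd]; exact hex, by rw [hfd]; exact hcont⟩⟩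

-- the central pointwise lemma: A's specials membership = B's is_special, on keys of arr
lemma pvSpecial_eq (arr : List Int) (hz : (0 : Int) ∉ arr) (x : Int) (hxS : x ∈ arr) :
    PySem.Set.contains
      ((PySem.Set.ofList arr).foldl
        (fun sp i =>
          (PySem.List.pyRange (2 * i) (arr.foldl (fun m i => max i m) 0 + 1) i).foldl
            (fun sp j => if (PySem.Set.ofList arr).contains j then sp.add j else sp) sp)
        PySem.Set.empty) x = pvIsSpecial (PySem.Dict.counter arr) x := by
  have hmx := pvMax_bound arr
  set mx := arr.foldl (fun m i => max i m) 0 with hmxdef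
  have hcontS : ∀ y : Int, (PySem.Set.ofList arr).contains y = true ↔ y ∈ arr := by
    intro y
    rw [PySem.Set.contains, List.contains_iff_mem, PySem.Set.mem_ofList]
  rw [Bool.eq_iff_iff]
  rw [PySem.Set.contains, List.contains_iff_mem]
  rw [pvMem_specials]
  have hxne : x ≠ 0 := fun h => hz (h ▸ hxS)
  constructor
  · rintro (h | ⟨i, hiS, hr, _⟩)
    · simp [PySem.Set.empty] at h
    · have hiarr : i ∈ arr := (PySem.Set.mem_ofList arr i).mp hiS
      have hine : i ≠ 0 := fun h => hz (h ▸ hiarr)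
      rcases lt_or_gt_of_ne hine with hneg | hpos
      · rw [pvRange_empty_of_neg _ _ _ hneg (by omega)] at hr
        simp at hr
      · rw [PySem.List.mem_pyRange_iff_of_pos hpos] at hr
        obtain ⟨h2i, _, hdvd⟩ := hr
        have hdx : i ∣ x := by
          have := dvd_add hdvd (⟨2, by ring⟩ : i ∣ 2 * i)
          simpa using this
        have hx0 : 0 < x := by omega
        unfold pvIsSpecial
        rw [if_neg (by omega)]
        rw [pvBridge _ _ hx0]
        exact ⟨i, by omega, by omega, hdx, by rw [PySem.Dict.contains_counter, List.contains_iff_mem]; exact hiarr⟩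
  · intro h
    unfold pvIsSpecial at h
    by_cases hx0 : x ≤ 0
    · rw [if_pos hx0] at h; simp at h
    · rw [if_neg hx0, pvBridge _ _ (by omega)] at h
      obtain ⟨e, he0, hex, hdvd, hcont⟩ := h
      rw [PySem.Dict.contains_counter, List.contains_iff_mem] at hcont
      obtain ⟨m, hm⟩ := hdvd
      have hm1 : 1 < m := by nlinarith
      refine Or.inr ⟨e, (PySem.Set.mem_ofList arr e).mpr hcont, ?_, (hcontS x).mpr hxS⟩
      rw [PySem.List.mem_pyRange_iff_of_pos he0]
      refine ⟨by nlinarith, by have := hmx.2 x hxS; omega, ?_⟩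
      exact (dvd_sub_right (⟨m, hm⟩ : e ∣ x)).mpr ⟨2, by ring⟩

-- ===== VERDICT (by name: the statement is the Claim_ definition above) =====
theorem countSpecialNumbers_spec : Claim_equal_countSpecialNumbers := by
  intro N arr _ hpre
  unfold Spec_countSpecialNumbers countSpecialNumbers countSpecialNumbers_alt
  have hsplit := pvFoldl_prod3
    (fun (d : PySem.Dict Int Int) (i : Int) => if d.contains i then d.modify i 0 (· + 1) else d.insert i 1)
    (fun (s : PySem.Set Int) (i : Int) => s.add i)
    (fun (m i : Int) => max i m)
    arr PySem.Dict.empty PySem.Set.empty 0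
  beta_reduce at hsplit
  rw [hsplit]
  have hfreqA :
      arr.foldl (fun (d : PySem.Dict Int Int) i =>
        if d.contains i then d.modify i 0 (· + 1) else d.insert i 1) PySem.Dict.empty
        = PySem.Dict.counter arr := by
    rw [PySem.Dict.counter_eq_foldl]
    exact PySem.List.foldl_congr_mem arr _ _ _ (fun acc x _ => pvStepA_eq_counter acc x)
  have hfreqB :
      arr.foldl (fun (d : PySem.Dict Int Int) x => d.insert x (d.getD x 0 + 1)) PySem.Dict.empty
        = PySem.Dict.counter arr := by
    rw [PySem.Dict.counter_eq_foldl]; rfl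
  have hdist : arr.foldl (fun (s : PySem.Set Int) i => s.add i) PySem.Set.empty
      = PySem.Set.ofList arr := by
    rw [PySem.Set.ofList_eq_foldl]; rfl
  simp only [hfreqA, hfreqB, hdist]
  rw [PySem.Dict.keys_counter, PySem.Dict.items_counter, List.foldl_map]
  apply PySem.List.foldl_congr_mem
  intro acc k hk
  have hkarr : k ∈ arr := (PySem.Set.mem_ofList arr k).mp hk
  rw [PySem.Dict.getD_counter]
  rw [pvSpecial_eq arr hpre k hkarr]
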